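-- pv_equiv track=rewrite | github.com/elldeeone/node-research | shared/parsers/extract-kaspad-events.py | merge_events
-- ===== SOURCE A (Python) =====
-- def merge_events(existing: list[dict[str, str]], generated: list[dict[str, str]]) -> list[dict[str, str]]:
--     merged: list[dict[str, str]] = []
--     seen: set[tuple[str, str, str]] = set()
--     for row in existing + generated:
--         normalized = {
--             "timestamp_utc": row.get("timestamp_utc", "").strip(),
--             "event_type": row.get("event_type", "").strip(),
--             "notes": row.get("notes", "").strip(),
--         }
--         key = (normalized["timestamp_utc"], normalized["event_type"], normalized["notes"])
--         if not normalized["timestamp_utc"] or not normalized["event_type"] or key in seen: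
--             continue
--         seen.add(key)
--         merged.append(normalized)
--     merged.sort(key=lambda row: (row["timestamp_utc"], row["event_type"], row["notes"]))
--     return merged
-- ===== SOURCE B (Python) =====
-- def merge_events(existing: list[dict[str, str]], generated: list[dict[str, str]]) -> list[dict[str, str]]:
--     # Collect normalized (timestamp, event_type, notes) triples, dropping rows
--     # with an empty timestamp or event type.
--     rows: list[tuple[str, str, str]] = []
--     for row in existing + generated:
--         t = row.get("timestamp_utc", "").strip()
--         e = row.get("event_type", "").strip()
--         n = row.get("notes", "").strip()
--         if t and e:
--             rows.append((t, e, n))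
--     # Sort the triples, then drop adjacent duplicates in one pass.
--     rows.sort()
--     out: list[dict[str, str]] = []
--     prev: tuple[str, str, str] | None = None
--     for key in rows:
--         if key != prev:
--             out.append({"timestamp_utc": key[0], "event_type": key[1], "notes": key[2]})
--             prev = key
--     return out
-- ===== Notes on version B (the rewrite author's own statement) =====
-- stated objective: alternative
-- what changed: Replaces the seen-set with first-occurrence dedup before sorting by a sort of plain normalized triples followed by a single adjacent-duplicate-dropping pass, building the output dicts only at the end.
import Mathlib
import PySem

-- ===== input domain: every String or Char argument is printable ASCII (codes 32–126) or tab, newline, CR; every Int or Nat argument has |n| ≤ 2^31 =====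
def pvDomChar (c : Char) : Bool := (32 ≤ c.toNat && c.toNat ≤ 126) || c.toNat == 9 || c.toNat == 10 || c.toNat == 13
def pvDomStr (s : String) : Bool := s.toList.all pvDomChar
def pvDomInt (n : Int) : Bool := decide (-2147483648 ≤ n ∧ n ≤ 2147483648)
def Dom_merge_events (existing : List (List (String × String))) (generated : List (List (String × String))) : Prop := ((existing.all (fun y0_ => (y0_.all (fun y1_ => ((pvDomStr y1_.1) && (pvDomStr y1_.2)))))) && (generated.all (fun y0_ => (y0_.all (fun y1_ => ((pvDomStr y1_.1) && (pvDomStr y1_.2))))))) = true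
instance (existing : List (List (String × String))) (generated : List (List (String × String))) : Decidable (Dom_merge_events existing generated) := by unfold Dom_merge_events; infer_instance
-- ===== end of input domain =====

-- B replaces A's seen-set dedup-before-sort by sort-the-normalized-triples then drop adjacent duplicates (objective: alternative decomposition, same cost).

-- ===== PORT A =====
-- row.get(k, "") (also row[k] in the sort lambda, where the key is always present)
def pvGetF (row : List (String × String)) (k : String) : String :=
  (PySem.Dict.mk row).getD k ""

-- the body of A's for-loop, state = (merged, seen)
def pvStepA (st : List (List (String × String)) × PySem.Set (String × String × String))
    (row : List (String × String)) : List (List (String × String)) × PySem.Set (String × String × String) :=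
  let t := PySem.Str.strip (pvGetF row "timestamp_utc")
  let e := PySem.Str.strip (pvGetF row "event_type")
  let n := PySem.Str.strip (pvGetF row "notes")
  let normalized := [("timestamp_utc", t), ("event_type", e), ("notes", n)]
  if t == "" || e == "" || PySem.Set.contains st.2 (t, e, n) then st
  else (st.1 ++ [normalized], PySem.Set.add st.2 (t, e, n))

-- A's sort key: the Python 3-tuple (row[...], row[...], row[...]); tuple comparison is the lexicographic order, modelled with toLex
def pvSortKeyA (row : List (String × String)) : String ×ₗ (String ×ₗ String) :=
  toLex (pvGetF row "timestamp_utc", toLex (pvGetF row "event_type", pvGetF row "notes"))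

def merge_events (existing : List (List (String × String))) (generated : List (List (String × String))) : List (List (String × String)) :=
  PySem.List.sorted (((existing ++ generated).foldl pvStepA ([], PySem.Set.empty)).1) pvSortKeyA false

-- ===== PORT B =====
-- the body of B's first loop: normalized triple, kept when timestamp and event type are nonempty
def pvStepB (acc : List (String × String × String)) (row : List (String × String)) : List (String × String × String) :=
  let t := PySem.Str.strip (pvGetF row "timestamp_utc")
  let e := PySem.Str.strip (pvGetF row "event_type")
  let n := PySem.Str.strip (pvGetF row "notes")
  if t != "" && e != "" then acc ++ [(t, e, n)] else acc

-- rows.sort(): Python tuple comparison is the lexicographic order, modelled with toLex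
def pvKeyT (k : String × String × String) : String ×ₗ (String ×ₗ String) :=
  toLex (k.1, toLex (k.2.1, k.2.2))

-- the body of B's second loop, state = (out, prev)
def pvStepD (st : List (List (String × String)) × Option (String × String × String))
    (k : String × String × String) : List (List (String × String)) × Option (String × String × String) :=
  if st.2 == some k then st
  else (st.1 ++ [[("timestamp_utc", k.1), ("event_type", k.2.1), ("notes", k.2.2)]], some k)

def merge_events_alt (existing : List (List (String × String))) (generated : List (List (String × String))) : List (List (String × String)) :=
  let rows := (existing ++ generated).foldl pvStepB []
  let sortedRows := PySem.List.sorted rows pvKeyT false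
  (sortedRows.foldl pvStepD ([], none)).1

-- ===== PRECONDITION & SPEC =====
def Spec_merge_events (existing : List (List (String × String))) (generated : List (List (String × String))) (out : List (List (String × String))) : Prop := out = merge_events_alt existing generated
instance (existing : List (List (String × String))) (generated : List (List (String × String))) (out : List (List (String × String))) : Decidable (Spec_merge_events existing generated out) := by unfold Spec_merge_events; infer_instance

-- ===== CLAIM (what is proved, stated in full; the proofs are below) =====
def Claim_equal_merge_events : Prop := ∀ (existing : List (List (String × String))) (generated : List (List (String × String))), Dom_merge_events existing generated → Spec_merge_events existing generated (merge_events existing generated)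

-- ===== LEMMAS AND PROOFS =====

-- the normalized triple of a row, and the keep test
def pvNormKey (row : List (String × String)) : String × String × String :=
  (PySem.Str.strip (pvGetF row "timestamp_utc"), PySem.Str.strip (pvGetF row "event_type"),
   PySem.Str.strip (pvGetF row "notes"))

def pvKeepP (row : List (String × String)) : Bool :=
  (pvNormKey row).1 != "" && (pvNormKey row).2.1 != ""

def pvMkRow (k : String × String × String) : List (String × String) :=
  [("timestamp_utc", k.1), ("event_type", k.2.1), ("notes", k.2.2)]

-- first-occurrence dedup relative to a set of already-seen keys
def pvDedupNew (s : PySem.Set (String × String × String)) :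
    List (String × String × String) → List (String × String × String) × PySem.Set (String × String × String)
  | [] => ([], s)
  | k :: ks =>
    if PySem.Set.contains s k then pvDedupNew s ks
    else
      let r := pvDedupNew (PySem.Set.add s k) ks
      (k :: r.1, r.2)

-- adjacent-duplicate dropping with a "previous" register
def pvAdj (p : Option (String × String × String)) :
    List (String × String × String) → List (String × String × String)
  | [] => []
  | k :: ks => if p = some k then pvAdj p ks else k :: pvAdj (some k) ks

lemma pvStepA_eq (st : List (List (String × String)) × PySem.Set (String × String × String))
    (r : List (String × String)) :
    pvStepA st r =
      if pvKeepP r && !PySem.Set.contains st.2 (pvNormKey r) then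
        (st.1 ++ [pvMkRow (pvNormKey r)], PySem.Set.add st.2 (pvNormKey r))
      else st := by
  simp only [pvStepA, pvKeepP, pvNormKey, pvMkRow, bne]
  cases h1 : PySem.Str.strip (pvGetF r "timestamp_utc") == "" <;>
    cases h2 : PySem.Str.strip (pvGetF r "event_type") == "" <;>
      cases h3 : PySem.Set.contains st.2
          (PySem.Str.strip (pvGetF r "timestamp_utc"), PySem.Str.strip (pvGetF r "event_type"),
           PySem.Str.strip (pvGetF r "notes")) <;>
        simp

lemma pvFoldA (L : List (List (String × String))) :
    ∀ (m : List (List (String × String))) (s : PySem.Set (String × String × String)),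
      L.foldl pvStepA (m, s) =
        (m ++ ((pvDedupNew s ((L.filter pvKeepP).map pvNormKey)).1).map pvMkRow,
          (pvDedupNew s ((L.filter pvKeepP).map pvNormKey)).2) := by
  induction L with
  | nil => intro m s; simp [pvDedupNew]
  | cons r L ih =>
    intro m s
    by_cases hk : pvKeepP r = true
    · by_cases hc : pvNormKey r ∈ s
      · simp [List.foldl_cons, pvStepA_eq, hk, hc, pvDedupNew, ih]
      · simp [List.foldl_cons, pvStepA_eq, hk, hc, pvDedupNew, ih]
    · have hk' : pvKeepP r = false := by simpa using hk
      simp [List.foldl_cons, pvStepA_eq, hk', ih]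

lemma pvFoldB (L : List (List (String × String))) (acc : List (String × String × String)) :
    L.foldl pvStepB acc = acc ++ (L.filter pvKeepP).map pvNormKey := by
  have h : ∀ (a : List (String × String × String)) (r : List (String × String)),
      pvStepB a r = if pvKeepP r then a ++ [pvNormKey r] else a := by
    intro a r; rfl
  exact Eq.trans
    (PySem.List.foldl_congr_mem L pvStepB
      (fun a r => if pvKeepP r then a ++ [pvNormKey r] else a) acc (fun a r _ => h a r))
    (PySem.List.foldl_append_if pvKeepP pvNormKey L acc)

lemma pvFoldD (l : List (String × String × String)) :
    ∀ (out : List (List (String × String))) (p : Option (String × String × String)),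
      (l.foldl pvStepD (out, p)).1 = out ++ (pvAdj p l).map pvMkRow := by
  induction l with
  | nil => intro out p; simp [pvAdj]
  | cons k l ih =>
    intro out p
    by_cases hp : p = some k
    · subst hp
      have hstep : pvStepD (out, some k) k = (out, some k) := by simp [pvStepD]
      rw [List.foldl_cons, hstep, ih]
      simp [pvAdj]
    · have hstep : pvStepD (out, p) k = (out ++ [pvMkRow k], some k) := by
        simp [pvStepD, pvMkRow, hp]
      rw [List.foldl_cons, hstep, ih]
      simp [pvAdj, hp]

lemma pvKeyT_inj : Function.Injective pvKeyT := by
  intro a b h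
  rcases a with ⟨a1, a2, a3⟩
  rcases b with ⟨b1, b2, b3⟩
  simp [pvKeyT] at h
  simp [h.1, h.2.1, h.2.2]

lemma pvAdj_spec :
    ∀ (l : List (String × String × String)) (p : Option (String × String × String)),
      l.Pairwise (fun a b => pvKeyT a ≤ pvKeyT b) →
      (∀ a, p = some a → ∀ x ∈ l, pvKeyT a ≤ pvKeyT x) →
      (pvAdj p l).Pairwise (fun a b => pvKeyT a < pvKeyT b) ∧
        (∀ x, x ∈ pvAdj p l ↔ (x ∈ l ∧ p ≠ some x)) := by
  intro l
  induction l with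
  | nil => intro p _ _; simp [pvAdj]
  | cons k l ih =>
    intro p hpair hp
    have hk : ∀ x ∈ l, pvKeyT k ≤ pvKeyT x := (List.pairwise_cons.mp hpair).1
    have hl : l.Pairwise (fun a b => pvKeyT a ≤ pvKeyT b) := (List.pairwise_cons.mp hpair).2
    by_cases hps : p = some k
    · subst hps
      obtain ⟨hpw, hmem⟩ := ih (some k) hl
        (fun a ha x hx => (Option.some.inj ha) ▸ hk x hx)
      have hadj : pvAdj (some k) (k :: l) = pvAdj (some k) l := by simp [pvAdj]
      rw [hadj]
      refine ⟨hpw, fun x => ?_⟩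
      rw [hmem x]
      constructor
      · rintro ⟨hx, hne⟩; exact ⟨List.mem_cons_of_mem _ hx, hne⟩
      · rintro ⟨hx, hne⟩
        rcases List.mem_cons.mp hx with rfl | hx
        · exact absurd rfl hne
        · exact ⟨hx, hne⟩
    · obtain ⟨hpw, hmem⟩ := ih (some k) hl
        (fun a ha x hx => (Option.some.inj ha) ▸ hk x hx)
      have hcons : pvAdj p (k :: l) = k :: pvAdj (some k) l := by simp [pvAdj, hps]
      constructor
      · rw [hcons]
        refine List.pairwise_cons.mpr ⟨?_, hpw⟩
        intro x hx
        obtain ⟨hxl, hne⟩ := (hmem x).mp hx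
        have hxk : x ≠ k := by intro h; exact hne (by rw [h])
        exact lt_of_le_of_ne (hk x hxl) (fun h => hxk (pvKeyT_inj h).symm)
      · intro x
        rw [hcons]
        constructor
        · intro hx
          rcases List.mem_cons.mp hx with rfl | hx
          · exact ⟨by simp, hps⟩
          · obtain ⟨hxl, _⟩ := (hmem x).mp hx
            refine ⟨List.mem_cons_of_mem _ hxl, ?_⟩
            intro hpx
            have h1 : pvKeyT x ≤ pvKeyT k := hp x hpx k (by simp)
            have h2 : pvKeyT k ≤ pvKeyT x := hk x hxl
            have hxkk : x = k := pvKeyT_inj (le_antisymm h1 h2)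
            exact hps (by rw [← hxkk, hpx])
        · rintro ⟨hx, hne⟩
          rcases List.mem_cons.mp hx with rfl | hxl
          · simp
          · by_cases hxk : x = k
            · simp [hxk]
            · exact List.mem_cons_of_mem _
                ((hmem x).mpr ⟨hxl, fun h => hxk (Option.some.inj h).symm⟩)

lemma pvDedupNew_update (ks : List (String × String × String)) :
    ∀ (s : PySem.Set (String × String × String)),
      s ++ (pvDedupNew s ks).1 = PySem.Set.update s ks := by
  induction ks with
  | nil => intro s; simp [pvDedupNew, PySem.Set.update]
  | cons k ks ih =>
    intro s
    by_cases hc : k ∈ s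
    · have ha : PySem.Set.add s k = s := by simp [PySem.Set.add, hc]
      have h3 : pvDedupNew s (k :: ks) = pvDedupNew s ks := by simp [pvDedupNew, hc]
      have h2 : PySem.Set.update s (k :: ks) = PySem.Set.update s ks := by
        simp [PySem.Set.update, ha]
      rw [h3, h2, ih s]
    · have ha : PySem.Set.add s k = s ++ [k] := by simp [PySem.Set.add, hc]
      have h3 : pvDedupNew s (k :: ks) =
          (k :: (pvDedupNew (PySem.Set.add s k) ks).1, (pvDedupNew (PySem.Set.add s k) ks).2) := by
        simp [pvDedupNew, hc]
      have h2 : PySem.Set.update s (k :: ks) = PySem.Set.update (PySem.Set.add s k) ks := by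
        simp [PySem.Set.update]
      rw [h3, h2, ← ih (PySem.Set.add s k), ha]
      simp

lemma pvDedupNew_empty (ks : List (String × String × String)) :
    (pvDedupNew PySem.Set.empty ks).1 = PySem.Set.ofList ks := by
  have := pvDedupNew_update ks PySem.Set.empty
  simpa [PySem.Set.empty, PySem.Set.update, PySem.Set.ofList_eq_foldl] using this

lemma pvSortKeyA_mk (k : String × String × String) : pvSortKeyA (pvMkRow k) = pvKeyT k := by
  rcases k with ⟨a, b, c⟩
  rfl

lemma pvInsertBy_map (x : String × String × String) (ys : List (String × String × String)) :
    PySem.List.insertBy (fun a b => decide (pvSortKeyA a < pvSortKeyA b)) (pvMkRow x) (ys.map pvMkRow)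
      = (PySem.List.insertBy (fun a b => decide (pvKeyT a < pvKeyT b)) x ys).map pvMkRow := by
  induction ys with
  | nil => simp [PySem.List.insertBy]
  | cons y ys ih =>
    simp only [List.map_cons, PySem.List.insertBy, pvSortKeyA_mk]
    by_cases h : pvKeyT x < pvKeyT y
    · simp [h]
    · simp [h, ih]

lemma pvSorted_map (xs : List (String × String × String)) :
    PySem.List.sorted (xs.map pvMkRow) pvSortKeyA false
      = (PySem.List.sorted xs pvKeyT false).map pvMkRow := by
  rw [PySem.List.sorted_eq_foldl_insertBy, PySem.List.sorted_eq_foldl_insertBy, List.foldl_map]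
  suffices h : ∀ (ys : List (String × String × String)),
      xs.foldl (fun acc x => PySem.List.insertBy (fun a b => decide (pvSortKeyA a < pvSortKeyA b)) (pvMkRow x) acc) (ys.map pvMkRow)
        = (xs.foldl (fun acc x => PySem.List.insertBy (fun a b => decide (pvKeyT a < pvKeyT b)) x acc) ys).map pvMkRow by
    simpa using h []
  induction xs with
  | nil => intro ys; simp
  | cons x xs ih =>
    intro ys
    simp only [List.foldl_cons, pvInsertBy_map]
    exact ih _

lemma pvCore (ks : List (String × String × String)) :
    PySem.List.sorted (PySem.Set.ofList ks) pvKeyT false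
      = pvAdj none (PySem.List.sorted ks pvKeyT false) := by
  have hs := PySem.List.sorted_pairwise ks pvKeyT
  obtain ⟨hpw, hmem⟩ := pvAdj_spec (PySem.List.sorted ks pvKeyT false) none hs (by simp)
  apply PySem.List.sorted_eq_of_perm_of_pairwise_lt
  · apply List.perm_of_nodup_nodup_toFinset_eq
    · exact (hpw.imp (fun h => fun he => absurd (he ▸ h) (lt_irrefl _)))
    · exact PySem.Set.nodup_ofList ks
    · ext x
      simp only [List.mem_toFinset, hmem x, PySem.List.mem_sorted, PySem.Set.mem_ofList]
      simp
  · exact hpw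

-- ===== VERDICT (by name: the statement is the Claim_ definition above) =====
theorem merge_events_spec : Claim_equal_merge_events := by
  intro existing generated _
  show merge_events existing generated = merge_events_alt existing generated
  unfold merge_events merge_events_alt
  rw [pvFoldB, pvFoldA]
  rw [pvFoldD]
  simp only [List.nil_append, pvDedupNew_empty]
  rw [pvSorted_map, pvCore]
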